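-- pv_equiv track=rewrite | github.com/wallaceblaia/ValeTTS-Colab | valetts/data/preprocessing/text_en.py | _basic_english_g2p
-- ===== SOURCE A (Python) =====
-- def _basic_english_g2p(text: str) -> str:
--     """Mapeamento básico G2P para inglês (fallback)."""
--     # Mapeamento muito básico - em produção usar phonemizer
--     basic_map = {
--         "a": "æ",
--         "e": "ɛ",
--         "i": "ɪ",
--         "o": "ɑ",
--         "u": "ʌ",
--         "th": "θ",
--         "sh": "ʃ",
--         "ch": "tʃ",
--         "ng": "ŋ",
--         "ph": "f",
--         "gh": "f",
--         "ck": "k",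
--     }
--
--     result = text
--     for graph, phoneme in basic_map.items():
--         result = result.replace(graph, phoneme)
--
--     return result
-- ===== SOURCE B (Python) =====
-- def _basic_english_g2p(text: str) -> str:
--     """Single left-to-right scan with digraph priority instead of 12 replace passes."""
--     digraphs = {"th": "θ", "sh": "ʃ", "ch": "tʃ", "ng": "ŋ", "ph": "f", "gh": "f", "ck": "k"}
--     vowels = {"a": "æ", "e": "ɛ", "i": "ɪ", "o": "ɑ", "u": "ʌ"}
--     out = []
--     i = 0
--     n = len(text)
--     while i < n:
--         two = text[i:i + 2]
--         if two in digraphs: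
--             out.append(digraphs[two])
--             i += 2
--         elif text[i] in vowels:
--             out.append(vowels[text[i]])
--             i += 1
--         else:
--             out.append(text[i])
--             i += 1
--     return "".join(out)
-- ===== Notes on version B (the rewrite author's own statement) =====
-- stated objective: alternative
-- what changed: B replaces A's twelve sequential full-string str.replace passes with a single left-to-right index scan that checks the 2-char digraph map first, then the vowel map, and emits the output in one traversal.
import Mathlib
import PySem

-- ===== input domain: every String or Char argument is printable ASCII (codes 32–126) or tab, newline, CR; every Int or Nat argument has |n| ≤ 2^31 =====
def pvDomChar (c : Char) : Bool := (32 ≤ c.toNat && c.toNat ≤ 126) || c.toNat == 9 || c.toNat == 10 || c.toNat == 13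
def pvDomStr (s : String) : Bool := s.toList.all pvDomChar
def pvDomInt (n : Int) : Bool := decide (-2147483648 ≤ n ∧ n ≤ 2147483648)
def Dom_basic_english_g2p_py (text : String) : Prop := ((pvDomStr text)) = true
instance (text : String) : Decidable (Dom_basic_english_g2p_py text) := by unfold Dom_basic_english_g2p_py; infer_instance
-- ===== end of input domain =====

-- B replaces A's twelve sequential str.replace passes with one left-to-right scan (digraph-first);
-- objective: alternative single-pass decomposition, same exact output (not measured faster).

-- ===== PORT A =====
-- the dict literal of _basic_english_g2p, in insertion order
def pvBasicMap : PySem.Dict String String :=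
  PySem.Dict.ofList
    [("a","æ"), ("e","ɛ"), ("i","ɪ"), ("o","ɑ"), ("u","ʌ"),
     ("th","θ"), ("sh","ʃ"), ("ch","tʃ"), ("ng","ŋ"),
     ("ph","f"), ("gh","f"), ("ck","k")]

-- for graph, phoneme in basic_map.items(): result = result.replace(graph, phoneme)
def basic_english_g2p_py (text : String) : String :=
  pvBasicMap.items.foldl (fun result gp => PySem.Str.replace result gp.1 gp.2) text

-- ===== PORT B =====
-- Source B's digraph and vowel dicts, keys as 1-/2-char lists of chars
def pvDigraphs : List (List Char × List Char) :=
  [(['t','h'],['θ']), (['s','h'],['ʃ']), (['c','h'],['t','ʃ']), (['n','g'],['ŋ']),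
   (['p','h'],['f']), (['g','h'],['f']), (['c','k'],['k'])]

def pvVowels : List (Char × Char) :=
  [('a','æ'), ('e','ɛ'), ('i','ɪ'), ('o','ɑ'), ('u','ʌ')]

-- Source B's while loop over i: `two = text[i:i+2]` is the 1-char slice in the last position
-- (the one-element pattern), the 2-char slice otherwise; each branch advances i by 2 or 1.
def pvScanGo : List Char → List Char
  | [] => []
  | c :: [] =>
    match List.lookup [c] pvDigraphs with
    | some v => v ++ pvScanGo []
    | none =>
      match List.lookup c pvVowels with
      | some v => v :: pvScanGo []
      | none => c :: pvScanGo []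
  | c :: c1 :: t =>
    match List.lookup [c, c1] pvDigraphs with
    | some v => v ++ pvScanGo t
    | none =>
      match List.lookup c pvVowels with
      | some v => v :: pvScanGo (c1 :: t)
      | none => c :: pvScanGo (c1 :: t)

-- "".join(out)
def basic_english_g2p_py_alt (text : String) : String :=
  String.ofList (pvScanGo text.toList)

-- ===== PRECONDITION & SPEC =====
def Spec_basic_english_g2p_py (text : String) (out : String) : Prop := out = basic_english_g2p_py_alt text
instance (text : String) (out : String) : Decidable (Spec_basic_english_g2p_py text out) := by unfold Spec_basic_english_g2p_py; infer_instance

-- ===== CLAIM (what is proved, stated in full; the proofs are below) =====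
def Claim_equal_basic_english_g2p_py : Prop := ∀ (text : String), Dom_basic_english_g2p_py text → Spec_basic_english_g2p_py text (basic_english_g2p_py text)

-- ===== LEMMAS AND PROOFS =====

-- Python str.replace for a nonempty pattern, as a direct recursion on the char list
def pvRep (old new : List Char) : List Char → List Char
  | [] => []
  | c :: t =>
    if old.isPrefixOf (c :: t) then
      new ++ pvRep old new (t.drop (old.length - 1))
    else c :: pvRep old new t
termination_by l => l.length
decreasing_by all_goals simp

theorem pvRep_nil (old new : List Char) : pvRep old new [] = [] := by rw [pvRep]

theorem pvRep1_ne (k vc c : Char) (t : List Char) (h : c ≠ k) :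
    pvRep [k] [vc] (c :: t) = c :: pvRep [k] [vc] t := by
  rw [pvRep, if_neg]
  simp [List.isPrefixOf]
  exact Ne.symm h

theorem pvRep1_match (k vc : Char) (t : List Char) :
    pvRep [k] [vc] (k :: t) = vc :: pvRep [k] [vc] t := by
  rw [pvRep, if_pos]
  · simp
  · simp [List.isPrefixOf]

theorem pvRep2_ne (k0 k1 : Char) (v : List Char) (c : Char) (t : List Char)
    (h : ¬(c = k0 ∧ t.head? = some k1)) :
    pvRep [k0,k1] v (c :: t) = c :: pvRep [k0,k1] v t := by
  rw [pvRep, if_neg]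
  cases t with
  | nil => simp [List.isPrefixOf]
  | cons c1 t' =>
    simp [List.isPrefixOf] at h ⊢
    intro h0
    exact fun h1 => h (Eq.symm h0) (Eq.symm h1)

theorem pvRep2_ne_left (k0 k1 : Char) (v : List Char) (c : Char) (t : List Char) (h : c ≠ k0) :
    pvRep [k0,k1] v (c :: t) = c :: pvRep [k0,k1] v t :=
  pvRep2_ne k0 k1 v c t (fun hh => h hh.1)

theorem pvRep2_ne_hd (k0 k1 : Char) (v : List Char) (c1 : Char) (t : List Char) (h : c1 ≠ k1) :
    pvRep [k0,k1] v (k0 :: c1 :: t) = k0 :: pvRep [k0,k1] v (c1 :: t) :=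
  pvRep2_ne k0 k1 v k0 (c1 :: t) (by simp [h])

theorem pvRep2_match (k0 k1 : Char) (v : List Char) (t : List Char) :
    pvRep [k0,k1] v (k0 :: k1 :: t) = v ++ pvRep [k0,k1] v t := by
  rw [pvRep, if_pos]
  · simp
  · simp [List.isPrefixOf]

theorem pvRep_head (old new : List Char) (l : List Char) (hn : new ≠ []) :
    (pvRep old new l).head? = l.head? ∨ (pvRep old new l).head? = new.head? := by
  cases l with
  | nil => left; rw [pvRep_nil]
  | cons c t =>
    rw [pvRep]
    split
    · right
      cases new with
      | nil => exact absurd rfl hn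
      | cons a b => simp
    · left; simp

theorem pvHead_step (old new t t0 : List Char) (hn : new ≠ [])
    (hnew : new.head? ≠ some 'h' ∧ new.head? ≠ some 'g' ∧ new.head? ≠ some 'k')
    (hI : (t.head? = some 'h' → t0.head? = some 'h') ∧ (t.head? = some 'g' → t0.head? = some 'g') ∧
      (t.head? = some 'k' → t0.head? = some 'k')) :
    ((pvRep old new t).head? = some 'h' → t0.head? = some 'h') ∧
      ((pvRep old new t).head? = some 'g' → t0.head? = some 'g') ∧
      ((pvRep old new t).head? = some 'k' → t0.head? = some 'k') := by
  rcases pvRep_head old new t hn with he | he <;> rw [he]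
  · exact hI
  · exact ⟨fun hx => absurd hx hnew.1, fun hx => absurd hx hnew.2.1, fun hx => absurd hx hnew.2.2⟩

-- A's twelve replace passes, composed in dict order (innermost first)
def pvChain (l : List Char) : List Char :=
  pvRep ['c','k'] ['k'] (pvRep ['g','h'] ['f'] (pvRep ['p','h'] ['f'] (pvRep ['n','g'] ['ŋ']
    (pvRep ['c','h'] ['t','ʃ'] (pvRep ['s','h'] ['ʃ'] (pvRep ['t','h'] ['θ']
      (pvRep ['u'] ['ʌ'] (pvRep ['o'] ['ɑ'] (pvRep ['i'] ['ɪ']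
        (pvRep ['e'] ['ɛ'] (pvRep ['a'] ['æ'] l)))))))))))

theorem pvGo_eq (old new : List Char) (h : old ≠ []) :
    ∀ (fuel : Nat) (l acc : List Char), l.length ≤ fuel →
      PySem.Chars.replace.go old new fuel l acc = acc.reverse ++ pvRep old new l := by
  intro fuel
  induction fuel with
  | zero =>
    intro l acc hl
    have hl0 : l = [] := by cases l <;> simp_all
    subst hl0
    rw [PySem.Chars.replace.go, pvRep]
  | succ n ih =>
    intro l acc hl
    cases l with
    | nil => rw [PySem.Chars.replace.go, pvRep]; simp; omega
    | cons c t =>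
      rw [PySem.Chars.replace.go, pvRep]
      by_cases hp : old.isPrefixOf (c :: t)
      · rw [if_pos hp, if_pos hp]
        obtain ⟨o, old', rfl⟩ : ∃ o old', old = o :: old' := by
          cases old with
          | nil => exact absurd rfl h
          | cons o old' => exact ⟨o, old', rfl⟩
        have hdrop : List.drop (o :: old').length (c :: t) = List.drop ((o :: old').length - 1) t := by
          simp
        have hlen : (List.drop ((o :: old').length - 1) t).length ≤ n := by
          simp only [List.length_drop]
          simp at hl
          omega
        rw [hdrop, ih _ _ hlen]
        simp
      · rw [if_neg hp, if_neg hp]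
        rw [ih _ _ (by simp at hl ⊢; omega)]
        simp

theorem pvReplace_eq (old new l : List Char) (h : old ≠ []) :
    PySem.Chars.replace l old new = pvRep old new l := by
  rw [PySem.Chars.replace]
  rw [if_neg (by simpa using h)]
  simpa using pvGo_eq old new h l.length l [] le_rfl

theorem pvA_chars (text : String) :
    (basic_english_g2p_py text).toList = pvChain text.toList := by
  have hitems : pvBasicMap.items =
    [("a","æ"), ("e","ɛ"), ("i","ɪ"), ("o","ɑ"), ("u","ʌ"),
     ("th","θ"), ("sh","ʃ"), ("ch","tʃ"), ("ng","ŋ"),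
     ("ph","f"), ("gh","f"), ("ck","k")] := by rfl
  rw [basic_english_g2p_py, hitems]
  simp only [List.foldl, PySem.Str.toList_replace]
  rw [pvChain]
  rw [pvReplace_eq _ _ _ (by decide), pvReplace_eq _ _ _ (by decide),
      pvReplace_eq _ _ _ (by decide), pvReplace_eq _ _ _ (by decide),
      pvReplace_eq _ _ _ (by decide), pvReplace_eq _ _ _ (by decide),
      pvReplace_eq _ _ _ (by decide), pvReplace_eq _ _ _ (by decide),
      pvReplace_eq _ _ _ (by decide), pvReplace_eq _ _ _ (by decide),
      pvReplace_eq _ _ _ (by decide), pvReplace_eq _ _ _ (by decide)]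
  rfl

theorem pvMainAux : ∀ (n : Nat) (l : List Char), l.length ≤ n → pvChain l = pvScanGo l := by
  intro n
  induction n with
  | zero =>
    intro l hl
    have hl0 : l = [] := by cases l <;> simp_all
    subst hl0
    simp [pvChain, pvRep_nil, pvScanGo]
  | succ n ih =>
    intro l hl
    cases l with
    | nil => simp [pvChain, pvRep_nil, pvScanGo]
    | cons c t =>
      by_cases hD0 : c = 't' ∧ t.head? = some 'h'
      · obtain ⟨rfl, hh⟩ := hD0
        obtain ⟨t', rfl⟩ : ∃ t', t = 'h' :: t' := by
          cases t with
          | nil => simp at hh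
          | cons a b => simp at hh; exact ⟨b, by rw [hh]⟩
        have hscan : pvScanGo ('t' :: 'h' :: t') = ['θ'] ++ pvScanGo t' := by
          simp [pvScanGo, pvDigraphs, List.lookup]
        have hIH := ih t' (by simp at hl; omega)
        rw [pvChain] at hIH
        rw [pvChain]
        rw [pvRep1_ne 'a' 'æ' 't' _ (by decide)]
        rw [pvRep1_ne 'a' 'æ' 'h' _ (by decide)]
        rw [pvRep1_ne 'e' 'ɛ' 't' _ (by decide)]
        rw [pvRep1_ne 'e' 'ɛ' 'h' _ (by decide)]
        rw [pvRep1_ne 'i' 'ɪ' 't' _ (by decide)]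
        rw [pvRep1_ne 'i' 'ɪ' 'h' _ (by decide)]
        rw [pvRep1_ne 'o' 'ɑ' 't' _ (by decide)]
        rw [pvRep1_ne 'o' 'ɑ' 'h' _ (by decide)]
        rw [pvRep1_ne 'u' 'ʌ' 't' _ (by decide)]
        rw [pvRep1_ne 'u' 'ʌ' 'h' _ (by decide)]
        rw [pvRep2_match 't' 'h' ['θ'] _]
        simp only [List.cons_append, List.nil_append]
        rw [pvRep2_ne_left 's' 'h' ['ʃ'] 'θ' _ (by decide)]
        rw [pvRep2_ne_left 'c' 'h' ['t','ʃ'] 'θ' _ (by decide)]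
        rw [pvRep2_ne_left 'n' 'g' ['ŋ'] 'θ' _ (by decide)]
        rw [pvRep2_ne_left 'p' 'h' ['f'] 'θ' _ (by decide)]
        rw [pvRep2_ne_left 'g' 'h' ['f'] 'θ' _ (by decide)]
        rw [pvRep2_ne_left 'c' 'k' ['k'] 'θ' _ (by decide)]
        rw [hIH, hscan]
        simp
      by_cases hD1 : c = 's' ∧ t.head? = some 'h'
      · obtain ⟨rfl, hh⟩ := hD1
        obtain ⟨t', rfl⟩ : ∃ t', t = 'h' :: t' := by
          cases t with
          | nil => simp at hh
          | cons a b => simp at hh; exact ⟨b, by rw [hh]⟩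
        have hscan : pvScanGo ('s' :: 'h' :: t') = ['ʃ'] ++ pvScanGo t' := by
          simp [pvScanGo, pvDigraphs, List.lookup]
        have hIH := ih t' (by simp at hl; omega)
        rw [pvChain] at hIH
        rw [pvChain]
        rw [pvRep1_ne 'a' 'æ' 's' _ (by decide)]
        rw [pvRep1_ne 'a' 'æ' 'h' _ (by decide)]
        rw [pvRep1_ne 'e' 'ɛ' 's' _ (by decide)]
        rw [pvRep1_ne 'e' 'ɛ' 'h' _ (by decide)]
        rw [pvRep1_ne 'i' 'ɪ' 's' _ (by decide)]
        rw [pvRep1_ne 'i' 'ɪ' 'h' _ (by decide)]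
        rw [pvRep1_ne 'o' 'ɑ' 's' _ (by decide)]
        rw [pvRep1_ne 'o' 'ɑ' 'h' _ (by decide)]
        rw [pvRep1_ne 'u' 'ʌ' 's' _ (by decide)]
        rw [pvRep1_ne 'u' 'ʌ' 'h' _ (by decide)]
        rw [pvRep2_ne_left 't' 'h' ['θ'] 's' _ (by decide)]
        rw [pvRep2_ne_left 't' 'h' ['θ'] 'h' _ (by decide)]
        rw [pvRep2_match 's' 'h' ['ʃ'] _]
        simp only [List.cons_append, List.nil_append]
        rw [pvRep2_ne_left 'c' 'h' ['t','ʃ'] 'ʃ' _ (by decide)]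
        rw [pvRep2_ne_left 'n' 'g' ['ŋ'] 'ʃ' _ (by decide)]
        rw [pvRep2_ne_left 'p' 'h' ['f'] 'ʃ' _ (by decide)]
        rw [pvRep2_ne_left 'g' 'h' ['f'] 'ʃ' _ (by decide)]
        rw [pvRep2_ne_left 'c' 'k' ['k'] 'ʃ' _ (by decide)]
        rw [hIH, hscan]
        simp
      by_cases hD2 : c = 'c' ∧ t.head? = some 'h'
      · obtain ⟨rfl, hh⟩ := hD2
        obtain ⟨t', rfl⟩ : ∃ t', t = 'h' :: t' := by
          cases t with
          | nil => simp at hh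
          | cons a b => simp at hh; exact ⟨b, by rw [hh]⟩
        have hscan : pvScanGo ('c' :: 'h' :: t') = ['t','ʃ'] ++ pvScanGo t' := by
          simp [pvScanGo, pvDigraphs, List.lookup]
        have hIH := ih t' (by simp at hl; omega)
        rw [pvChain] at hIH
        rw [pvChain]
        rw [pvRep1_ne 'a' 'æ' 'c' _ (by decide)]
        rw [pvRep1_ne 'a' 'æ' 'h' _ (by decide)]
        rw [pvRep1_ne 'e' 'ɛ' 'c' _ (by decide)]
        rw [pvRep1_ne 'e' 'ɛ' 'h' _ (by decide)]
        rw [pvRep1_ne 'i' 'ɪ' 'c' _ (by decide)]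
        rw [pvRep1_ne 'i' 'ɪ' 'h' _ (by decide)]
        rw [pvRep1_ne 'o' 'ɑ' 'c' _ (by decide)]
        rw [pvRep1_ne 'o' 'ɑ' 'h' _ (by decide)]
        rw [pvRep1_ne 'u' 'ʌ' 'c' _ (by decide)]
        rw [pvRep1_ne 'u' 'ʌ' 'h' _ (by decide)]
        rw [pvRep2_ne_left 't' 'h' ['θ'] 'c' _ (by decide)]
        rw [pvRep2_ne_left 't' 'h' ['θ'] 'h' _ (by decide)]
        rw [pvRep2_ne_left 's' 'h' ['ʃ'] 'c' _ (by decide)]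
        rw [pvRep2_ne_left 's' 'h' ['ʃ'] 'h' _ (by decide)]
        rw [pvRep2_match 'c' 'h' ['t','ʃ'] _]
        simp only [List.cons_append, List.nil_append]
        rw [pvRep2_ne_left 'n' 'g' ['ŋ'] 't' _ (by decide)]
        rw [pvRep2_ne_left 'n' 'g' ['ŋ'] 'ʃ' _ (by decide)]
        rw [pvRep2_ne_left 'p' 'h' ['f'] 't' _ (by decide)]
        rw [pvRep2_ne_left 'p' 'h' ['f'] 'ʃ' _ (by decide)]
        rw [pvRep2_ne_left 'g' 'h' ['f'] 't' _ (by decide)]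
        rw [pvRep2_ne_left 'g' 'h' ['f'] 'ʃ' _ (by decide)]
        rw [pvRep2_ne_left 'c' 'k' ['k'] 't' _ (by decide)]
        rw [pvRep2_ne_left 'c' 'k' ['k'] 'ʃ' _ (by decide)]
        rw [hIH, hscan]
        simp
      by_cases hD3 : c = 'n' ∧ t.head? = some 'g'
      · obtain ⟨rfl, hh⟩ := hD3
        obtain ⟨t', rfl⟩ : ∃ t', t = 'g' :: t' := by
          cases t with
          | nil => simp at hh
          | cons a b => simp at hh; exact ⟨b, by rw [hh]⟩
        have hscan : pvScanGo ('n' :: 'g' :: t') = ['ŋ'] ++ pvScanGo t' := by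
          simp [pvScanGo, pvDigraphs, List.lookup]
        have hIH := ih t' (by simp at hl; omega)
        rw [pvChain] at hIH
        rw [pvChain]
        rw [pvRep1_ne 'a' 'æ' 'n' _ (by decide)]
        rw [pvRep1_ne 'a' 'æ' 'g' _ (by decide)]
        rw [pvRep1_ne 'e' 'ɛ' 'n' _ (by decide)]
        rw [pvRep1_ne 'e' 'ɛ' 'g' _ (by decide)]
        rw [pvRep1_ne 'i' 'ɪ' 'n' _ (by decide)]
        rw [pvRep1_ne 'i' 'ɪ' 'g' _ (by decide)]
        rw [pvRep1_ne 'o' 'ɑ' 'n' _ (by decide)]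
        rw [pvRep1_ne 'o' 'ɑ' 'g' _ (by decide)]
        rw [pvRep1_ne 'u' 'ʌ' 'n' _ (by decide)]
        rw [pvRep1_ne 'u' 'ʌ' 'g' _ (by decide)]
        rw [pvRep2_ne_left 't' 'h' ['θ'] 'n' _ (by decide)]
        rw [pvRep2_ne_left 't' 'h' ['θ'] 'g' _ (by decide)]
        rw [pvRep2_ne_left 's' 'h' ['ʃ'] 'n' _ (by decide)]
        rw [pvRep2_ne_left 's' 'h' ['ʃ'] 'g' _ (by decide)]
        rw [pvRep2_ne_left 'c' 'h' ['t','ʃ'] 'n' _ (by decide)]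
        rw [pvRep2_ne_left 'c' 'h' ['t','ʃ'] 'g' _ (by decide)]
        rw [pvRep2_match 'n' 'g' ['ŋ'] _]
        simp only [List.cons_append, List.nil_append]
        rw [pvRep2_ne_left 'p' 'h' ['f'] 'ŋ' _ (by decide)]
        rw [pvRep2_ne_left 'g' 'h' ['f'] 'ŋ' _ (by decide)]
        rw [pvRep2_ne_left 'c' 'k' ['k'] 'ŋ' _ (by decide)]
        rw [hIH, hscan]
        simp
      by_cases hD4 : c = 'p' ∧ t.head? = some 'h'
      · obtain ⟨rfl, hh⟩ := hD4
        obtain ⟨t', rfl⟩ : ∃ t', t = 'h' :: t' := by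
          cases t with
          | nil => simp at hh
          | cons a b => simp at hh; exact ⟨b, by rw [hh]⟩
        have hscan : pvScanGo ('p' :: 'h' :: t') = ['f'] ++ pvScanGo t' := by
          simp [pvScanGo, pvDigraphs, List.lookup]
        have hIH := ih t' (by simp at hl; omega)
        rw [pvChain] at hIH
        rw [pvChain]
        rw [pvRep1_ne 'a' 'æ' 'p' _ (by decide)]
        rw [pvRep1_ne 'a' 'æ' 'h' _ (by decide)]
        rw [pvRep1_ne 'e' 'ɛ' 'p' _ (by decide)]
        rw [pvRep1_ne 'e' 'ɛ' 'h' _ (by decide)]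
        rw [pvRep1_ne 'i' 'ɪ' 'p' _ (by decide)]
        rw [pvRep1_ne 'i' 'ɪ' 'h' _ (by decide)]
        rw [pvRep1_ne 'o' 'ɑ' 'p' _ (by decide)]
        rw [pvRep1_ne 'o' 'ɑ' 'h' _ (by decide)]
        rw [pvRep1_ne 'u' 'ʌ' 'p' _ (by decide)]
        rw [pvRep1_ne 'u' 'ʌ' 'h' _ (by decide)]
        rw [pvRep2_ne_left 't' 'h' ['θ'] 'p' _ (by decide)]
        rw [pvRep2_ne_left 't' 'h' ['θ'] 'h' _ (by decide)]
        rw [pvRep2_ne_left 's' 'h' ['ʃ'] 'p' _ (by decide)]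
        rw [pvRep2_ne_left 's' 'h' ['ʃ'] 'h' _ (by decide)]
        rw [pvRep2_ne_left 'c' 'h' ['t','ʃ'] 'p' _ (by decide)]
        rw [pvRep2_ne_left 'c' 'h' ['t','ʃ'] 'h' _ (by decide)]
        rw [pvRep2_ne_left 'n' 'g' ['ŋ'] 'p' _ (by decide)]
        rw [pvRep2_ne_left 'n' 'g' ['ŋ'] 'h' _ (by decide)]
        rw [pvRep2_match 'p' 'h' ['f'] _]
        simp only [List.cons_append, List.nil_append]
        rw [pvRep2_ne_left 'g' 'h' ['f'] 'f' _ (by decide)]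
        rw [pvRep2_ne_left 'c' 'k' ['k'] 'f' _ (by decide)]
        rw [hIH, hscan]
        simp
      by_cases hD5 : c = 'g' ∧ t.head? = some 'h'
      · obtain ⟨rfl, hh⟩ := hD5
        obtain ⟨t', rfl⟩ : ∃ t', t = 'h' :: t' := by
          cases t with
          | nil => simp at hh
          | cons a b => simp at hh; exact ⟨b, by rw [hh]⟩
        have hscan : pvScanGo ('g' :: 'h' :: t') = ['f'] ++ pvScanGo t' := by
          simp [pvScanGo, pvDigraphs, List.lookup]
        have hIH := ih t' (by simp at hl; omega)
        rw [pvChain] at hIH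
        rw [pvChain]
        rw [pvRep1_ne 'a' 'æ' 'g' _ (by decide)]
        rw [pvRep1_ne 'a' 'æ' 'h' _ (by decide)]
        rw [pvRep1_ne 'e' 'ɛ' 'g' _ (by decide)]
        rw [pvRep1_ne 'e' 'ɛ' 'h' _ (by decide)]
        rw [pvRep1_ne 'i' 'ɪ' 'g' _ (by decide)]
        rw [pvRep1_ne 'i' 'ɪ' 'h' _ (by decide)]
        rw [pvRep1_ne 'o' 'ɑ' 'g' _ (by decide)]
        rw [pvRep1_ne 'o' 'ɑ' 'h' _ (by decide)]
        rw [pvRep1_ne 'u' 'ʌ' 'g' _ (by decide)]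
        rw [pvRep1_ne 'u' 'ʌ' 'h' _ (by decide)]
        rw [pvRep2_ne_left 't' 'h' ['θ'] 'g' _ (by decide)]
        rw [pvRep2_ne_left 't' 'h' ['θ'] 'h' _ (by decide)]
        rw [pvRep2_ne_left 's' 'h' ['ʃ'] 'g' _ (by decide)]
        rw [pvRep2_ne_left 's' 'h' ['ʃ'] 'h' _ (by decide)]
        rw [pvRep2_ne_left 'c' 'h' ['t','ʃ'] 'g' _ (by decide)]
        rw [pvRep2_ne_left 'c' 'h' ['t','ʃ'] 'h' _ (by decide)]
        rw [pvRep2_ne_left 'n' 'g' ['ŋ'] 'g' _ (by decide)]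
        rw [pvRep2_ne_left 'n' 'g' ['ŋ'] 'h' _ (by decide)]
        rw [pvRep2_ne_left 'p' 'h' ['f'] 'g' _ (by decide)]
        rw [pvRep2_ne_left 'p' 'h' ['f'] 'h' _ (by decide)]
        rw [pvRep2_match 'g' 'h' ['f'] _]
        simp only [List.cons_append, List.nil_append]
        rw [pvRep2_ne_left 'c' 'k' ['k'] 'f' _ (by decide)]
        rw [hIH, hscan]
        simp
      by_cases hD6 : c = 'c' ∧ t.head? = some 'k'
      · obtain ⟨rfl, hh⟩ := hD6
        obtain ⟨t', rfl⟩ : ∃ t', t = 'k' :: t' := by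
          cases t with
          | nil => simp at hh
          | cons a b => simp at hh; exact ⟨b, by rw [hh]⟩
        have hscan : pvScanGo ('c' :: 'k' :: t') = ['k'] ++ pvScanGo t' := by
          simp [pvScanGo, pvDigraphs, List.lookup]
        have hIH := ih t' (by simp at hl; omega)
        rw [pvChain] at hIH
        rw [pvChain]
        rw [pvRep1_ne 'a' 'æ' 'c' _ (by decide)]
        rw [pvRep1_ne 'a' 'æ' 'k' _ (by decide)]
        rw [pvRep1_ne 'e' 'ɛ' 'c' _ (by decide)]
        rw [pvRep1_ne 'e' 'ɛ' 'k' _ (by decide)]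
        rw [pvRep1_ne 'i' 'ɪ' 'c' _ (by decide)]
        rw [pvRep1_ne 'i' 'ɪ' 'k' _ (by decide)]
        rw [pvRep1_ne 'o' 'ɑ' 'c' _ (by decide)]
        rw [pvRep1_ne 'o' 'ɑ' 'k' _ (by decide)]
        rw [pvRep1_ne 'u' 'ʌ' 'c' _ (by decide)]
        rw [pvRep1_ne 'u' 'ʌ' 'k' _ (by decide)]
        rw [pvRep2_ne_left 't' 'h' ['θ'] 'c' _ (by decide)]
        rw [pvRep2_ne_left 't' 'h' ['θ'] 'k' _ (by decide)]
        rw [pvRep2_ne_left 's' 'h' ['ʃ'] 'c' _ (by decide)]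
        rw [pvRep2_ne_left 's' 'h' ['ʃ'] 'k' _ (by decide)]
        rw [pvRep2_ne_hd 'c' 'h' ['t','ʃ'] 'k' _ (by decide)]
        rw [pvRep2_ne_left 'c' 'h' ['t','ʃ'] 'k' _ (by decide)]
        rw [pvRep2_ne_left 'n' 'g' ['ŋ'] 'c' _ (by decide)]
        rw [pvRep2_ne_left 'n' 'g' ['ŋ'] 'k' _ (by decide)]
        rw [pvRep2_ne_left 'p' 'h' ['f'] 'c' _ (by decide)]
        rw [pvRep2_ne_left 'p' 'h' ['f'] 'k' _ (by decide)]
        rw [pvRep2_ne_left 'g' 'h' ['f'] 'c' _ (by decide)]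
        rw [pvRep2_ne_left 'g' 'h' ['f'] 'k' _ (by decide)]
        rw [pvRep2_match 'c' 'k' ['k'] _]
        simp only [List.cons_append, List.nil_append]
        rw [hIH, hscan]
        simp
      by_cases hV0 : c = 'a'
      · subst hV0
        have hscan : pvScanGo ('a' :: t) = 'æ' :: pvScanGo t := by
          cases t with
          | nil => simp [pvScanGo, pvDigraphs, pvVowels, List.lookup]
          | cons a b => simp [pvScanGo, pvDigraphs, pvVowels, List.lookup]
        have hIH := ih t (by simp at hl; omega)
        rw [pvChain] at hIH
        rw [pvChain]
        rw [pvRep1_match 'a' 'æ' _]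
        rw [pvRep1_ne 'e' 'ɛ' 'æ' _ (by decide)]
        rw [pvRep1_ne 'i' 'ɪ' 'æ' _ (by decide)]
        rw [pvRep1_ne 'o' 'ɑ' 'æ' _ (by decide)]
        rw [pvRep1_ne 'u' 'ʌ' 'æ' _ (by decide)]
        rw [pvRep2_ne_left 't' 'h' ['θ'] 'æ' _ (by decide)]
        rw [pvRep2_ne_left 's' 'h' ['ʃ'] 'æ' _ (by decide)]
        rw [pvRep2_ne_left 'c' 'h' ['t','ʃ'] 'æ' _ (by decide)]
        rw [pvRep2_ne_left 'n' 'g' ['ŋ'] 'æ' _ (by decide)]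
        rw [pvRep2_ne_left 'p' 'h' ['f'] 'æ' _ (by decide)]
        rw [pvRep2_ne_left 'g' 'h' ['f'] 'æ' _ (by decide)]
        rw [pvRep2_ne_left 'c' 'k' ['k'] 'æ' _ (by decide)]
        rw [hIH, hscan]
      by_cases hV1 : c = 'e'
      · subst hV1
        have hscan : pvScanGo ('e' :: t) = 'ɛ' :: pvScanGo t := by
          cases t with
          | nil => simp [pvScanGo, pvDigraphs, pvVowels, List.lookup]
          | cons a b => simp [pvScanGo, pvDigraphs, pvVowels, List.lookup]
        have hIH := ih t (by simp at hl; omega)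
        rw [pvChain] at hIH
        rw [pvChain]
        rw [pvRep1_ne 'a' 'æ' 'e' _ (by decide)]
        rw [pvRep1_match 'e' 'ɛ' _]
        rw [pvRep1_ne 'i' 'ɪ' 'ɛ' _ (by decide)]
        rw [pvRep1_ne 'o' 'ɑ' 'ɛ' _ (by decide)]
        rw [pvRep1_ne 'u' 'ʌ' 'ɛ' _ (by decide)]
        rw [pvRep2_ne_left 't' 'h' ['θ'] 'ɛ' _ (by decide)]
        rw [pvRep2_ne_left 's' 'h' ['ʃ'] 'ɛ' _ (by decide)]
        rw [pvRep2_ne_left 'c' 'h' ['t','ʃ'] 'ɛ' _ (by decide)]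
        rw [pvRep2_ne_left 'n' 'g' ['ŋ'] 'ɛ' _ (by decide)]
        rw [pvRep2_ne_left 'p' 'h' ['f'] 'ɛ' _ (by decide)]
        rw [pvRep2_ne_left 'g' 'h' ['f'] 'ɛ' _ (by decide)]
        rw [pvRep2_ne_left 'c' 'k' ['k'] 'ɛ' _ (by decide)]
        rw [hIH, hscan]
      by_cases hV2 : c = 'i'
      · subst hV2
        have hscan : pvScanGo ('i' :: t) = 'ɪ' :: pvScanGo t := by
          cases t with
          | nil => simp [pvScanGo, pvDigraphs, pvVowels, List.lookup]
          | cons a b => simp [pvScanGo, pvDigraphs, pvVowels, List.lookup]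
        have hIH := ih t (by simp at hl; omega)
        rw [pvChain] at hIH
        rw [pvChain]
        rw [pvRep1_ne 'a' 'æ' 'i' _ (by decide)]
        rw [pvRep1_ne 'e' 'ɛ' 'i' _ (by decide)]
        rw [pvRep1_match 'i' 'ɪ' _]
        rw [pvRep1_ne 'o' 'ɑ' 'ɪ' _ (by decide)]
        rw [pvRep1_ne 'u' 'ʌ' 'ɪ' _ (by decide)]
        rw [pvRep2_ne_left 't' 'h' ['θ'] 'ɪ' _ (by decide)]
        rw [pvRep2_ne_left 's' 'h' ['ʃ'] 'ɪ' _ (by decide)]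
        rw [pvRep2_ne_left 'c' 'h' ['t','ʃ'] 'ɪ' _ (by decide)]
        rw [pvRep2_ne_left 'n' 'g' ['ŋ'] 'ɪ' _ (by decide)]
        rw [pvRep2_ne_left 'p' 'h' ['f'] 'ɪ' _ (by decide)]
        rw [pvRep2_ne_left 'g' 'h' ['f'] 'ɪ' _ (by decide)]
        rw [pvRep2_ne_left 'c' 'k' ['k'] 'ɪ' _ (by decide)]
        rw [hIH, hscan]
      by_cases hV3 : c = 'o'
      · subst hV3
        have hscan : pvScanGo ('o' :: t) = 'ɑ' :: pvScanGo t := by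
          cases t with
          | nil => simp [pvScanGo, pvDigraphs, pvVowels, List.lookup]
          | cons a b => simp [pvScanGo, pvDigraphs, pvVowels, List.lookup]
        have hIH := ih t (by simp at hl; omega)
        rw [pvChain] at hIH
        rw [pvChain]
        rw [pvRep1_ne 'a' 'æ' 'o' _ (by decide)]
        rw [pvRep1_ne 'e' 'ɛ' 'o' _ (by decide)]
        rw [pvRep1_ne 'i' 'ɪ' 'o' _ (by decide)]
        rw [pvRep1_match 'o' 'ɑ' _]
        rw [pvRep1_ne 'u' 'ʌ' 'ɑ' _ (by decide)]
        rw [pvRep2_ne_left 't' 'h' ['θ'] 'ɑ' _ (by decide)]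
        rw [pvRep2_ne_left 's' 'h' ['ʃ'] 'ɑ' _ (by decide)]
        rw [pvRep2_ne_left 'c' 'h' ['t','ʃ'] 'ɑ' _ (by decide)]
        rw [pvRep2_ne_left 'n' 'g' ['ŋ'] 'ɑ' _ (by decide)]
        rw [pvRep2_ne_left 'p' 'h' ['f'] 'ɑ' _ (by decide)]
        rw [pvRep2_ne_left 'g' 'h' ['f'] 'ɑ' _ (by decide)]
        rw [pvRep2_ne_left 'c' 'k' ['k'] 'ɑ' _ (by decide)]
        rw [hIH, hscan]
      by_cases hV4 : c = 'u'
      · subst hV4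
        have hscan : pvScanGo ('u' :: t) = 'ʌ' :: pvScanGo t := by
          cases t with
          | nil => simp [pvScanGo, pvDigraphs, pvVowels, List.lookup]
          | cons a b => simp [pvScanGo, pvDigraphs, pvVowels, List.lookup]
        have hIH := ih t (by simp at hl; omega)
        rw [pvChain] at hIH
        rw [pvChain]
        rw [pvRep1_ne 'a' 'æ' 'u' _ (by decide)]
        rw [pvRep1_ne 'e' 'ɛ' 'u' _ (by decide)]
        rw [pvRep1_ne 'i' 'ɪ' 'u' _ (by decide)]
        rw [pvRep1_ne 'o' 'ɑ' 'u' _ (by decide)]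
        rw [pvRep1_match 'u' 'ʌ' _]
        rw [pvRep2_ne_left 't' 'h' ['θ'] 'ʌ' _ (by decide)]
        rw [pvRep2_ne_left 's' 'h' ['ʃ'] 'ʌ' _ (by decide)]
        rw [pvRep2_ne_left 'c' 'h' ['t','ʃ'] 'ʌ' _ (by decide)]
        rw [pvRep2_ne_left 'n' 'g' ['ŋ'] 'ʌ' _ (by decide)]
        rw [pvRep2_ne_left 'p' 'h' ['f'] 'ʌ' _ (by decide)]
        rw [pvRep2_ne_left 'g' 'h' ['f'] 'ʌ' _ (by decide)]
        rw [pvRep2_ne_left 'c' 'k' ['k'] 'ʌ' _ (by decide)]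
        rw [hIH, hscan]
      have hIH := ih t (by simp at hl; omega)
      rw [pvChain] at hIH
      have hscan : pvScanGo (c :: t) = c :: pvScanGo t := by
        cases t with
        | nil =>
          have v0 : (c == 'a') = false := by simp [hV0]
          have v1 : (c == 'e') = false := by simp [hV1]
          have v2 : (c == 'i') = false := by simp [hV2]
          have v3 : (c == 'o') = false := by simp [hV3]
          have v4 : (c == 'u') = false := by simp [hV4]
          simp only [pvScanGo, pvDigraphs, pvVowels, List.lookup]
          simp [v0, v1, v2, v3, v4]
        | cons a b =>
          simp only [List.head?_cons, Option.some.injEq] at hD0 hD1 hD2 hD3 hD4 hD5 hD6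
          push Not at hD0 hD1 hD2 hD3 hD4 hD5 hD6
          have d0 : ((c == 't') && (a == 'h')) = false := by
            by_cases hx : c = 't'
            · simp [hx, hD0 hx]
            · simp [hx]
          have d1 : ((c == 's') && (a == 'h')) = false := by
            by_cases hx : c = 's'
            · simp [hx, hD1 hx]
            · simp [hx]
          have d2 : ((c == 'c') && (a == 'h')) = false := by
            by_cases hx : c = 'c'
            · simp [hx, hD2 hx]
            · simp [hx]
          have d3 : ((c == 'n') && (a == 'g')) = false := by
            by_cases hx : c = 'n'
            · simp [hx, hD3 hx]
            · simp [hx]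
          have d4 : ((c == 'p') && (a == 'h')) = false := by
            by_cases hx : c = 'p'
            · simp [hx, hD4 hx]
            · simp [hx]
          have d5 : ((c == 'g') && (a == 'h')) = false := by
            by_cases hx : c = 'g'
            · simp [hx, hD5 hx]
            · simp [hx]
          have d6 : ((c == 'c') && (a == 'k')) = false := by
            by_cases hx : c = 'c'
            · simp [hx, hD6 hx]
            · simp [hx]
          have v0 : (c == 'a') = false := by simp [hV0]
          have v1 : (c == 'e') = false := by simp [hV1]
          have v2 : (c == 'i') = false := by simp [hV2]
          have v3 : (c == 'o') = false := by simp [hV3]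
          have v4 : (c == 'u') = false := by simp [hV4]
          simp [pvScanGo, pvDigraphs, pvVowels, List.lookup, v0, v1, v2, v3, v4, d0, d1, d2, d3, d4, d5, d6]
      rw [pvChain]
      rw [pvRep1_ne 'a' 'æ' c _ hV0]
      rw [pvRep1_ne 'e' 'ɛ' c _ hV1]
      rw [pvRep1_ne 'i' 'ɪ' c _ hV2]
      rw [pvRep1_ne 'o' 'ɑ' c _ hV3]
      rw [pvRep1_ne 'u' 'ʌ' c _ hV4]
      have hd0 : ((t.head? = some 'h' → t.head? = some 'h') ∧ (t.head? = some 'g' → t.head? = some 'g') ∧ (t.head? = some 'k' → t.head? = some 'k')) := ⟨id, id, id⟩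
      have hd1 := pvHead_step ['a'] ['æ'] (t) t (by decide) (by decide) hd0
      have hd2 := pvHead_step ['e'] ['ɛ'] (pvRep ['a'] ['æ'] (t)) t (by decide) (by decide) hd1
      have hd3 := pvHead_step ['i'] ['ɪ'] (pvRep ['e'] ['ɛ'] (pvRep ['a'] ['æ'] (t))) t (by decide) (by decide) hd2
      have hd4 := pvHead_step ['o'] ['ɑ'] (pvRep ['i'] ['ɪ'] (pvRep ['e'] ['ɛ'] (pvRep ['a'] ['æ'] (t)))) t (by decide) (by decide) hd3
      have hd5 := pvHead_step ['u'] ['ʌ'] (pvRep ['o'] ['ɑ'] (pvRep ['i'] ['ɪ'] (pvRep ['e'] ['ɛ'] (pvRep ['a'] ['æ'] (t))))) t (by decide) (by decide) hd4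
      have hd6 := pvHead_step ['t','h'] ['θ'] (pvRep ['u'] ['ʌ'] (pvRep ['o'] ['ɑ'] (pvRep ['i'] ['ɪ'] (pvRep ['e'] ['ɛ'] (pvRep ['a'] ['æ'] (t)))))) t (by decide) (by decide) hd5
      have hd7 := pvHead_step ['s','h'] ['ʃ'] (pvRep ['t','h'] ['θ'] (pvRep ['u'] ['ʌ'] (pvRep ['o'] ['ɑ'] (pvRep ['i'] ['ɪ'] (pvRep ['e'] ['ɛ'] (pvRep ['a'] ['æ'] (t))))))) t (by decide) (by decide) hd6
      have hd8 := pvHead_step ['c','h'] ['t','ʃ'] (pvRep ['s','h'] ['ʃ'] (pvRep ['t','h'] ['θ'] (pvRep ['u'] ['ʌ'] (pvRep ['o'] ['ɑ'] (pvRep ['i'] ['ɪ'] (pvRep ['e'] ['ɛ'] (pvRep ['a'] ['æ'] (t)))))))) t (by decide) (by decide) hd7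
      have hd9 := pvHead_step ['n','g'] ['ŋ'] (pvRep ['c','h'] ['t','ʃ'] (pvRep ['s','h'] ['ʃ'] (pvRep ['t','h'] ['θ'] (pvRep ['u'] ['ʌ'] (pvRep ['o'] ['ɑ'] (pvRep ['i'] ['ɪ'] (pvRep ['e'] ['ɛ'] (pvRep ['a'] ['æ'] (t))))))))) t (by decide) (by decide) hd8
      have hd10 := pvHead_step ['p','h'] ['f'] (pvRep ['n','g'] ['ŋ'] (pvRep ['c','h'] ['t','ʃ'] (pvRep ['s','h'] ['ʃ'] (pvRep ['t','h'] ['θ'] (pvRep ['u'] ['ʌ'] (pvRep ['o'] ['ɑ'] (pvRep ['i'] ['ɪ'] (pvRep ['e'] ['ɛ'] (pvRep ['a'] ['æ'] (t)))))))))) t (by decide) (by decide) hd9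
      have hd11 := pvHead_step ['g','h'] ['f'] (pvRep ['p','h'] ['f'] (pvRep ['n','g'] ['ŋ'] (pvRep ['c','h'] ['t','ʃ'] (pvRep ['s','h'] ['ʃ'] (pvRep ['t','h'] ['θ'] (pvRep ['u'] ['ʌ'] (pvRep ['o'] ['ɑ'] (pvRep ['i'] ['ɪ'] (pvRep ['e'] ['ɛ'] (pvRep ['a'] ['æ'] (t))))))))))) t (by decide) (by decide) hd10
      rw [pvRep2_ne 't' 'h' ['θ'] c (pvRep ['u'] ['ʌ'] (pvRep ['o'] ['ɑ'] (pvRep ['i'] ['ɪ'] (pvRep ['e'] ['ɛ'] (pvRep ['a'] ['æ'] (t)))))) (fun hc => hD0 ⟨hc.1, hd5.1 hc.2⟩)]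
      rw [pvRep2_ne 's' 'h' ['ʃ'] c (pvRep ['t','h'] ['θ'] (pvRep ['u'] ['ʌ'] (pvRep ['o'] ['ɑ'] (pvRep ['i'] ['ɪ'] (pvRep ['e'] ['ɛ'] (pvRep ['a'] ['æ'] (t))))))) (fun hc => hD1 ⟨hc.1, hd6.1 hc.2⟩)]
      rw [pvRep2_ne 'c' 'h' ['t','ʃ'] c (pvRep ['s','h'] ['ʃ'] (pvRep ['t','h'] ['θ'] (pvRep ['u'] ['ʌ'] (pvRep ['o'] ['ɑ'] (pvRep ['i'] ['ɪ'] (pvRep ['e'] ['ɛ'] (pvRep ['a'] ['æ'] (t)))))))) (fun hc => hD2 ⟨hc.1, hd7.1 hc.2⟩)]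
      rw [pvRep2_ne 'n' 'g' ['ŋ'] c (pvRep ['c','h'] ['t','ʃ'] (pvRep ['s','h'] ['ʃ'] (pvRep ['t','h'] ['θ'] (pvRep ['u'] ['ʌ'] (pvRep ['o'] ['ɑ'] (pvRep ['i'] ['ɪ'] (pvRep ['e'] ['ɛ'] (pvRep ['a'] ['æ'] (t))))))))) (fun hc => hD3 ⟨hc.1, hd8.2.1 hc.2⟩)]
      rw [pvRep2_ne 'p' 'h' ['f'] c (pvRep ['n','g'] ['ŋ'] (pvRep ['c','h'] ['t','ʃ'] (pvRep ['s','h'] ['ʃ'] (pvRep ['t','h'] ['θ'] (pvRep ['u'] ['ʌ'] (pvRep ['o'] ['ɑ'] (pvRep ['i'] ['ɪ'] (pvRep ['e'] ['ɛ'] (pvRep ['a'] ['æ'] (t)))))))))) (fun hc => hD4 ⟨hc.1, hd9.1 hc.2⟩)]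
      rw [pvRep2_ne 'g' 'h' ['f'] c (pvRep ['p','h'] ['f'] (pvRep ['n','g'] ['ŋ'] (pvRep ['c','h'] ['t','ʃ'] (pvRep ['s','h'] ['ʃ'] (pvRep ['t','h'] ['θ'] (pvRep ['u'] ['ʌ'] (pvRep ['o'] ['ɑ'] (pvRep ['i'] ['ɪ'] (pvRep ['e'] ['ɛ'] (pvRep ['a'] ['æ'] (t))))))))))) (fun hc => hD5 ⟨hc.1, hd10.1 hc.2⟩)]
      rw [pvRep2_ne 'c' 'k' ['k'] c (pvRep ['g','h'] ['f'] (pvRep ['p','h'] ['f'] (pvRep ['n','g'] ['ŋ'] (pvRep ['c','h'] ['t','ʃ'] (pvRep ['s','h'] ['ʃ'] (pvRep ['t','h'] ['θ'] (pvRep ['u'] ['ʌ'] (pvRep ['o'] ['ɑ'] (pvRep ['i'] ['ɪ'] (pvRep ['e'] ['ɛ'] (pvRep ['a'] ['æ'] (t)))))))))))) (fun hc => hD6 ⟨hc.1, hd11.2.2 hc.2⟩)]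
      rw [hIH, hscan]

-- ===== VERDICT (by name: the statement is the Claim_ definition above) =====
theorem basic_english_g2p_py_spec : Claim_equal_basic_english_g2p_py := by
  intro text _
  unfold Spec_basic_english_g2p_py
  apply String.toList_inj.mp
  rw [pvA_chars]
  simp only [basic_english_g2p_py_alt, String.toList_ofList]
  exact pvMainAux _ _ le_rfl
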